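-- pv_equiv track=rewrite | github.com/pkohvaei/pyUMI | pyUMI/DMappedSolver.py | best_alignment
-- ===== SOURCE A (Python) =====
-- def best_alignment(as_nm_list):
--     max_score = max([i for i,j in as_nm_list])
--     l1 = [(i,j) for i,j in as_nm_list if i == max_score]
--     best = []
--     if len(l1) ==1:
--         best = l1
--     else:
--         min_mismatch = min([j for i,j in l1])
--         l2 = [(i,j) for i,j in l1 if j == min_mismatch]
--         best = l2
--     return best
-- ===== SOURCE B (Python) =====
-- def best_alignment(as_nm_list):
--     it = iter(as_nm_list)
--     try:
--         s, m = next(it)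
--     except StopIteration:
--         raise ValueError("best_alignment() arg is an empty sequence")
--     best = [(s, m)]
--     for i, j in it:
--         if i > s:
--             s, m, best = i, j, [(i, j)]
--         elif i == s:
--             if j < m:
--                 m, best = j, [(i, j)]
--             elif j == m:
--                 best.append((i, j))
--     return best
-- ===== Notes on version B (the rewrite author's own statement) =====
-- stated objective: alternative
-- what changed: Replaces A's multi-pass pipeline (max over all scores, filter, then min over mismatches and a second filter, with a separate singleton branch) by one unified forward scan maintaining the running best score, best mismatch and the list of current winners.
-- outside the precondition, e.g. on best_alignment([]): A raises ValueError, B raises ValueError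
import Mathlib
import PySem

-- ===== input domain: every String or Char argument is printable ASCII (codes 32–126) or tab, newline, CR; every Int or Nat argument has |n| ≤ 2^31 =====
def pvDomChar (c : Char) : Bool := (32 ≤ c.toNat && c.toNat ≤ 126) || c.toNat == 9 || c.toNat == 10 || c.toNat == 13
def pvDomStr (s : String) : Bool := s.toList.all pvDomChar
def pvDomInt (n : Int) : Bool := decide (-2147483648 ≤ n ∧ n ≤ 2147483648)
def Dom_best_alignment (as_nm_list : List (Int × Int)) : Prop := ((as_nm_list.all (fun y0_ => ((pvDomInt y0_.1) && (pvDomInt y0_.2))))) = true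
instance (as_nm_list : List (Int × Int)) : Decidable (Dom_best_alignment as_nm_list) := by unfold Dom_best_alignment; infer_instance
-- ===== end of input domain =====

-- B replaces A's multi-pass max/filter/min/filter pipeline by a single forward scan
-- maintaining (best score, best mismatch, current winners); same return value on all
-- nonempty inputs (both raise ValueError on []).


-- ===== PORT A =====
def best_alignment (as_nm_list : List (Int × Int)) : List (Int × Int) :=
  match PySem.List.max? (as_nm_list.map (fun p => p.1)) (fun y => y) with
  | none => []  -- Python: max([]) raises ValueError; excluded by Pre_
  | some max_score =>
    let l1 := as_nm_list.filter (fun p => p.1 == max_score)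
    if l1.length == 1 then
      l1
    else
      match PySem.List.min? (l1.map (fun p => p.2)) (fun y => y) with
      | none => []  -- Python: min([]) would raise; unreachable under Pre_
      | some min_mismatch => l1.filter (fun p => p.2 == min_mismatch)

-- ===== PORT B =====
def baLoop (s m : Int) (best : List (Int × Int)) : List (Int × Int) → List (Int × Int)
  | [] => best
  | (i, j) :: rest =>
    if i > s then baLoop i j [(i, j)] rest
    else if i == s then
      if j < m then baLoop s j [(i, j)] rest
      else if j == m then baLoop s m (best ++ [(i, j)]) rest
      else baLoop s m best rest
    else baLoop s m best rest

def best_alignment_alt (as_nm_list : List (Int × Int)) : List (Int × Int) :=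
  match as_nm_list with
  | [] => []  -- Python B raises ValueError here; excluded by Pre_
  | (s, m) :: rest => baLoop s m [(s, m)] rest

-- ===== PRECONDITION & SPEC =====
-- Pre_ excludes exactly the empty list, on which both A (max([])) and B raise ValueError.
def Pre_best_alignment (as_nm_list : List (Int × Int)) : Prop := as_nm_list ≠ []
instance (as_nm_list : List (Int × Int)) : Decidable (Pre_best_alignment as_nm_list) := by unfold Pre_best_alignment; infer_instance
def pvWitness_best_alignment : (List (Int × Int)) := [(3, 1), (3, 0), (2, 0), (3, 0)]

def Spec_best_alignment (as_nm_list : List (Int × Int)) (out : List (Int × Int)) : Prop := out = best_alignment_alt as_nm_list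
instance (as_nm_list : List (Int × Int)) (out : List (Int × Int)) : Decidable (Spec_best_alignment as_nm_list out) := by unfold Spec_best_alignment; infer_instance

-- ===== CLAIM (what is proved, stated in full; the proofs are below) =====
def Claim_equal_best_alignment : Prop := ∀ (as_nm_list : List (Int × Int)), Dom_best_alignment as_nm_list → Pre_best_alignment as_nm_list → Spec_best_alignment as_nm_list (best_alignment as_nm_list)

-- ===== LEMMAS AND PROOFS =====

-- the max score seen after the first element x and further elements l
def msF (x : Int × Int) (l : List (Int × Int)) : Int := (l.map Prod.fst).foldl max x.1
-- the elements attaining the max score, in order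
def f1F (x : Int × Int) (l : List (Int × Int)) : List (Int × Int) :=
  (x :: l).filter (fun p => p.1 == msF x l)
-- the min mismatch among them
def mmF (x : Int × Int) (l : List (Int × Int)) : Int :=
  match f1F x l with
  | [] => 0
  | y :: t => (t.map Prod.snd).foldl min y.2
-- the winners
def bspec (x : Int × Int) (l : List (Int × Int)) : List (Int × Int) :=
  (f1F x l).filter (fun p => p.2 == mmF x l)

theorem ms_bound (x : Int × Int) (l : List (Int × Int)) :
    ∀ q ∈ x :: l, q.1 ≤ msF x l := by
  intro q hq
  have h := PySem.List.le_foldl_max (l.map Prod.fst) x.1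
  rcases List.mem_cons.mp hq with rfl | hm
  · exact h.1
  · exact h.2 _ (List.mem_map_of_mem hm)

theorem f1_ne_nil (x : Int × Int) (l : List (Int × Int)) : f1F x l ≠ [] := by
  have h := PySem.List.foldl_max_mem (l.map Prod.fst) x.1
  intro hnil
  unfold f1F at hnil
  rw [List.filter_eq_nil_iff] at hnil
  rcases h with h | h
  · exact hnil x (List.mem_cons_self) (by simp [msF, h])
  · rcases List.mem_map.mp h with ⟨q, hq, hq1⟩
    exact hnil q (List.mem_cons_of_mem _ hq) (by simp [msF, hq1])

theorem mm_bound (x : Int × Int) (l : List (Int × Int)) :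
    ∀ q ∈ f1F x l, mmF x l ≤ q.2 := by
  intro q hq
  rcases hf : f1F x l with _ | ⟨y, t⟩
  · exact absurd hf (f1_ne_nil x l)
  · have h := PySem.List.foldl_min_le (t.map Prod.snd) y.2
    rw [hf] at hq
    rcases List.mem_cons.mp hq with rfl | hm
    · simpa [mmF, hf] using h.1
    · simpa [mmF, hf] using h.2 _ (List.mem_map_of_mem hm)

theorem ms_append (x p : Int × Int) (l : List (Int × Int)) :
    msF x (l ++ [p]) = max (msF x l) p.1 := by
  simp [msF]

-- case p.1 > current max: everything resets to [p]
theorem f1_append_gt (x p : Int × Int) (l : List (Int × Int)) (h : msF x l < p.1) :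
    f1F x (l ++ [p]) = [p] := by
  have hms : msF x (l ++ [p]) = p.1 := by
    rw [ms_append]; exact max_eq_right (le_of_lt h)
  show ((x :: l) ++ [p]).filter (fun q => q.1 == msF x (l ++ [p])) = [p]
  rw [List.filter_append, hms]
  have h1 : (x :: l).filter (fun q => q.1 == p.1) = [] := by
    rw [List.filter_eq_nil_iff]
    intro q hq
    have := ms_bound x l q hq
    simp only [beq_iff_eq]; omega
  simp [h1]

-- case p.1 = current max: p joins the max-score list
theorem f1_append_eq (x p : Int × Int) (l : List (Int × Int)) (h : p.1 = msF x l) :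
    f1F x (l ++ [p]) = f1F x l ++ [p] := by
  have hms : msF x (l ++ [p]) = msF x l := by
    rw [ms_append]; exact max_eq_left (le_of_eq h)
  show ((x :: l) ++ [p]).filter (fun q => q.1 == msF x (l ++ [p])) = _
  rw [List.filter_append, hms]
  simp [f1F, h]

-- case p.1 < current max: nothing changes
theorem f1_append_lt (x p : Int × Int) (l : List (Int × Int)) (h : p.1 < msF x l) :
    f1F x (l ++ [p]) = f1F x l := by
  have hms : msF x (l ++ [p]) = msF x l := by
    rw [ms_append]; exact max_eq_left (le_of_lt h)
  show ((x :: l) ++ [p]).filter (fun q => q.1 == msF x (l ++ [p])) = _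
  rw [List.filter_append, hms]
  have : [p].filter (fun q => q.1 == msF x l) = [] := by
    rw [List.filter_eq_nil_iff]
    intro q hq
    rw [List.mem_singleton] at hq
    subst hq
    simp only [beq_iff_eq]; omega
  simp [this, f1F]

theorem mm_of_f1 (x : Int × Int) (l l' : List (Int × Int)) (h : f1F x l' = f1F x l) :
    mmF x l' = mmF x l := by
  unfold mmF; rw [h]

theorem mm_append_of_f1 (x p : Int × Int) (l l' : List (Int × Int))
    (h : f1F x l' = f1F x l ++ [p]) : mmF x l' = min (mmF x l) p.2 := by
  rcases hf : f1F x l with _ | ⟨y, t⟩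
  · exact absurd hf (f1_ne_nil x l)
  · unfold mmF
    rw [h, hf]
    simp [List.foldl_map]

theorem mm_singleton (x : Int × Int) (l : List (Int × Int)) (y : Int × Int)
    (h : f1F x l = [y]) : mmF x l = y.2 := by
  unfold mmF; rw [h]; rfl

theorem bspec_singleton (x : Int × Int) (l : List (Int × Int)) (y : Int × Int)
    (h : f1F x l = [y]) : bspec x l = [y] := by
  unfold bspec; rw [h, mm_singleton x l y h]; simp

-- one step of the invariant, per case
theorem bspec_append_gt (x p : Int × Int) (l : List (Int × Int)) (h : msF x l < p.1) :
    bspec x (l ++ [p]) = [p] :=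
  bspec_singleton x (l ++ [p]) p (f1_append_gt x p l h)

theorem bspec_append_eq_lt (x p : Int × Int) (l : List (Int × Int))
    (h1 : p.1 = msF x l) (h2 : p.2 < mmF x l) : bspec x (l ++ [p]) = [p] := by
  have hf := f1_append_eq x p l h1
  have hm' : mmF x (l ++ [p]) = p.2 := by
    rw [mm_append_of_f1 x p l (l ++ [p]) hf]
    exact min_eq_right (le_of_lt h2)
  unfold bspec
  rw [hf, hm', List.filter_append]
  have : (f1F x l).filter (fun q => q.2 == p.2) = [] := by
    rw [List.filter_eq_nil_iff]
    intro q hq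
    have := mm_bound x l q hq
    simp only [beq_iff_eq]; omega
  simp [this]

theorem bspec_append_eq_eq (x p : Int × Int) (l : List (Int × Int))
    (h1 : p.1 = msF x l) (h2 : p.2 = mmF x l) :
    bspec x (l ++ [p]) = bspec x l ++ [p] := by
  have hf := f1_append_eq x p l h1
  have hm' : mmF x (l ++ [p]) = mmF x l := by
    rw [mm_append_of_f1 x p l (l ++ [p]) hf]
    exact min_eq_left (le_of_eq h2.symm)
  unfold bspec
  rw [hf, hm', List.filter_append]
  simp [h2]

theorem bspec_append_eq_gt (x p : Int × Int) (l : List (Int × Int))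
    (h1 : p.1 = msF x l) (h2 : mmF x l < p.2) : bspec x (l ++ [p]) = bspec x l := by
  have hf := f1_append_eq x p l h1
  have hm' : mmF x (l ++ [p]) = mmF x l := by
    rw [mm_append_of_f1 x p l (l ++ [p]) hf]
    exact min_eq_left (le_of_lt h2)
  unfold bspec
  rw [hf, hm', List.filter_append]
  have : [p].filter (fun q => q.2 == mmF x l) = [] := by
    rw [List.filter_eq_nil_iff]
    intro q hq
    rw [List.mem_singleton] at hq
    subst hq
    simp only [beq_iff_eq]; omega
  simp [this]

theorem bspec_append_lt (x p : Int × Int) (l : List (Int × Int)) (h : p.1 < msF x l) :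
    bspec x (l ++ [p]) = bspec x l := by
  have hf := f1_append_lt x p l h
  unfold bspec; rw [hf, mm_of_f1 x l (l ++ [p]) hf]

-- the loop invariant: starting from the state of prefix `pref`, consuming `rest`
-- lands on the state of `pref ++ rest`
theorem baLoop_inv (x : Int × Int) :
    ∀ (rest pref : List (Int × Int)),
      baLoop (msF x pref) (mmF x pref) (bspec x pref) rest = bspec x (pref ++ rest) := by
  intro rest
  induction rest with
  | nil => intro pref; simp [baLoop]
  | cons p rs ih =>
    intro pref
    obtain ⟨i, j⟩ := p
    have hassoc : pref ++ (i, j) :: rs = (pref ++ [(i, j)]) ++ rs := by simp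
    rw [hassoc]
    have H := ih (pref ++ [(i, j)])
    show baLoop (msF x pref) (mmF x pref) (bspec x pref) ((i, j) :: rs) = _
    unfold baLoop
    rcases lt_trichotomy (msF x pref) i with hlt | heq | hgt
    · -- i > current max
      have hms : msF x (pref ++ [(i, j)]) = i := by
        rw [ms_append]; exact max_eq_right (le_of_lt hlt)
      have hbs : bspec x (pref ++ [(i, j)]) = [(i, j)] := bspec_append_gt x (i, j) pref hlt
      have hmm : mmF x (pref ++ [(i, j)]) = j :=
        mm_singleton x (pref ++ [(i, j)]) (i, j) (f1_append_gt x (i, j) pref hlt)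
      rw [if_pos hlt]
      rw [hms, hmm, hbs] at H
      exact H
    · -- i = current max
      have h1 : ((i, j) : Int × Int).1 = msF x pref := heq.symm
      have hms : msF x (pref ++ [(i, j)]) = msF x pref := by
        rw [ms_append]; exact max_eq_left (le_of_eq heq.symm)
      have hmm := mm_append_of_f1 x (i, j) pref (pref ++ [(i, j)])
        (f1_append_eq x (i, j) pref h1)
      rw [if_neg (by omega), if_pos (by simp [heq])]
      rcases lt_trichotomy j (mmF x pref) with hj | hj | hj
      · rw [if_pos hj]
        have hbs := bspec_append_eq_lt x (i, j) pref h1 hj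
        have hmm' : mmF x (pref ++ [(i, j)]) = j := by
          rw [hmm]; exact min_eq_right (le_of_lt hj)
        rw [hms, hmm', hbs] at H
        exact H
      · rw [if_neg (by omega), if_pos (by simp [hj])]
        have hbs := bspec_append_eq_eq x (i, j) pref h1 hj
        have hmm' : mmF x (pref ++ [(i, j)]) = mmF x pref := by
          rw [hmm]; exact min_eq_left (le_of_eq hj.symm)
        rw [hms, hmm', hbs] at H
        exact H
      · rw [if_neg (by omega), if_neg (by simp; omega)]
        have hbs := bspec_append_eq_gt x (i, j) pref h1 hj
        have hmm' : mmF x (pref ++ [(i, j)]) = mmF x pref := by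
          rw [hmm]; exact min_eq_left (le_of_lt hj)
        rw [hms, hmm', hbs] at H
        exact H
    · -- i < current max
      rw [if_neg (by omega), if_neg (by simp; omega)]
      have hf := f1_append_lt x (i, j) pref hgt
      have hbs := bspec_append_lt x (i, j) pref hgt
      have hms : msF x (pref ++ [(i, j)]) = msF x pref := by
        rw [ms_append]; exact max_eq_left (le_of_lt hgt)
      have hmm := mm_of_f1 x pref (pref ++ [(i, j)]) hf
      rw [hms, hmm, hbs] at H
      exact H

theorem alt_eq_bspec (x : Int × Int) (rest : List (Int × Int)) :
    best_alignment_alt (x :: rest) = bspec x rest := by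
  obtain ⟨s, m⟩ := x
  have h0f : f1F (s, m) [] = [(s, m)] := by simp [f1F, msF]
  have h0s : msF (s, m) [] = s := by simp [msF]
  have h0m : mmF (s, m) [] = m := mm_singleton (s, m) [] (s, m) h0f
  have h0b : bspec (s, m) [] = [(s, m)] := bspec_singleton (s, m) [] (s, m) h0f
  have H := baLoop_inv (s, m) rest []
  rw [h0s, h0m, h0b] at H
  simpa [best_alignment_alt] using H

theorem a_eq_bspec (x : Int × Int) (rest : List (Int × Int)) :
    best_alignment (x :: rest) = bspec x rest := by
  unfold best_alignment
  have hmax : PySem.List.max? ((x :: rest).map (fun p => p.1)) (fun y => y)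
      = some (msF x rest) := by
    rw [List.map_cons, PySem.List.max?_id_cons]
    simp [msF]
  rw [hmax]
  have hl1 : (x :: rest).filter (fun p => p.1 == msF x rest) = f1F x rest := rfl
  simp only [hl1]
  split
  · -- length = 1 branch
    rename_i hlen
    rcases hf : f1F x rest with _ | ⟨y, t⟩
    · exact absurd hf (f1_ne_nil x rest)
    · rw [hf] at hlen
      simp at hlen
      subst hlen
      exact (bspec_singleton x rest y hf).symm
  · rcases hf : f1F x rest with _ | ⟨y, t⟩
    · exact absurd hf (f1_ne_nil x rest)
    · have hmm : mmF x rest = (t.map Prod.snd).foldl min y.2 := by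
        unfold mmF; rw [hf]
      simp only [List.map_cons, PySem.List.min?_id_cons]
      unfold bspec
      rw [hf, hmm]

-- ===== VERDICT (by name: the statement is the Claim_ definition above) =====
theorem best_alignment_spec : Claim_equal_best_alignment := by
  intro as_nm_list _hdom hpre
  unfold Spec_best_alignment
  rcases as_nm_list with _ | ⟨x, rest⟩
  · exact absurd rfl hpre
  · rw [a_eq_bspec, alt_eq_bspec]
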